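-- pv_equiv track=rewrite | github.com/tatooedlaura-byte/mygenealogy | scripts/regenerate_people_reorganized.py | parent_role_for
-- ===== SOURCE A (Python) =====
-- def parent_role_for(parent_id, people):
--     """Return 'Father' or 'Mother' if the parent record asserts that role,
--     else 'Parent'. This is not inference — it reads the parent's own
--     declared `father-of` / `mother-of` claims."""
--     p = people.get(parent_id)
--     if not p:
--         return "Parent"
--     has_father = any(c.get("predicate") == "father-of" for c in p.get("claims", []))
--     has_mother = any(c.get("predicate") == "mother-of" for c in p.get("claims", []))
--     if has_father and not has_mother:
--         return "Father"
--     if has_mother and not has_father: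
--         return "Mother"
--     return "Parent"
-- ===== SOURCE B (Python) =====
-- _ROLE_OF_PREDICATE = {"father-of": "Father", "mother-of": "Mother"}
--
-- def parent_role_for(parent_id, people):
--     """Return 'Father' or 'Mother' if the parent record asserts that role,
--     else 'Parent'. One fold over the claims with a saturating accumulator:
--     the first role claim sets the state, a conflicting one collapses it to
--     'Parent', and anything else leaves it alone."""
--     p = people.get(parent_id)
--     if not p:
--         return "Parent"
--     role = None
--     for c in p.get("claims", []):
--         r = _ROLE_OF_PREDICATE.get(c.get("predicate"))
--         if r is None:
--             continue
--         if role is None: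
--             role = r
--         elif role != r:
--             role = "Parent"
--     return role or "Parent"
-- ===== Notes on version B (the rewrite author's own statement) =====
-- stated objective: alternative
-- what changed: B replaces A's two any() scans plus two guarded branches by a single fold over the claims with a saturating role accumulator (None -> first declared role, collapsed to 'Parent' on a conflicting role), returning the accumulator directly.
import Mathlib
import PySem

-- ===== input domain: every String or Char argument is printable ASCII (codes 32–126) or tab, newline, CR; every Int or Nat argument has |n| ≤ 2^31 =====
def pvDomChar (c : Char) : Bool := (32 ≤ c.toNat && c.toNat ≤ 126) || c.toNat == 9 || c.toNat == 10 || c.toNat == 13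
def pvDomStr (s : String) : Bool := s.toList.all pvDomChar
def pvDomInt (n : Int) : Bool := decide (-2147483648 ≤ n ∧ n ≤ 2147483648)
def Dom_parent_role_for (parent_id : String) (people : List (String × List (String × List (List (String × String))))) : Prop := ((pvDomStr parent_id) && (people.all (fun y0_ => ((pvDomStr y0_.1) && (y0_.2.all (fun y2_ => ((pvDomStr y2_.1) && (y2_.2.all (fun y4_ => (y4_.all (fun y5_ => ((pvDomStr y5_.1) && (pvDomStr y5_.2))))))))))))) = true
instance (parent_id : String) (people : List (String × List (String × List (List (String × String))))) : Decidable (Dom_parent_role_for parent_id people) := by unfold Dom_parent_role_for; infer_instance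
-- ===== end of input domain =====

-- B replaces A's two any() scans by one fold with a saturating role accumulator (alternative decomposition, same cost).


-- ===== PORT A =====
-- Python dict[str,V] as an association list: .get(k) is the first match (shared helper)
def assocGet? {ν : Type} (d : List (String × ν)) (k : String) : Option ν :=
  match d with
  | [] => none
  | (k', v) :: rest => if k' = k then some v else assocGet? rest k

-- .get(k, dflt)
def assocGetD {ν : Type} (d : List (String × ν)) (k : String) (dflt : ν) : ν :=
  (assocGet? d k).getD dflt

-- literal port of A: two any() scans over the claims, then two guarded branches
def parent_role_for (parent_id : String) (people : List (String × List (String × List (List (String × String))))) : String :=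
  match assocGet? people parent_id with
  | none => "Parent"
  | some p =>
    if p = [] then "Parent"   -- 'not p': an empty dict is falsy
    else
      let claims := assocGetD p "claims" []
      let has_father := claims.any (fun c => assocGet? c "predicate" == some "father-of")
      let has_mother := claims.any (fun c => assocGet? c "predicate" == some "mother-of")
      if has_father && !has_mother then "Father"
      else if has_mother && !has_father then "Mother"
      else "Parent"

-- ===== PORT B =====
-- _ROLE_OF_PREDICATE = {"father-of": "Father", "mother-of": "Mother"}
def roleOfPredicate : List (String × String) := [("father-of", "Father"), ("mother-of", "Mother")]

-- one loop iteration of B: _ROLE_OF_PREDICATE.get(c.get("predicate")) merged into the accumulator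
def roleStep (role : Option String) (c : List (String × String)) : Option String :=
  match (assocGet? c "predicate").bind (fun s => assocGet? roleOfPredicate s) with
  | none => role          -- continue
  | some r =>
    match role with
    | none => some r
    | some cur => if cur = r then role else some "Parent"

-- port of B: a single fold over the claims with a saturating role accumulator
def parent_role_for_alt (parent_id : String) (people : List (String × List (String × List (List (String × String))))) : String :=
  match assocGet? people parent_id with
  | none => "Parent"
  | some p =>
    if p = [] then "Parent"   -- 'not p': an empty dict is falsy
    else
      let role := (assocGetD p "claims" []).foldl roleStep none
      role.getD "Parent"      -- 'role or "Parent"' (role is never the empty string)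

-- ===== PRECONDITION & SPEC =====
def Spec_parent_role_for (parent_id : String) (people : List (String × List (String × List (List (String × String))))) (out : String) : Prop := out = parent_role_for_alt parent_id people
instance (parent_id : String) (people : List (String × List (String × List (List (String × String))))) (out : String) : Decidable (Spec_parent_role_for parent_id people out) := by unfold Spec_parent_role_for; infer_instance

-- ===== CLAIM (what is proved, stated in full; the proofs are below) =====
def Claim_equal_parent_role_for : Prop := ∀ (parent_id : String) (people : List (String × List (String × List (List (String × String))))), Dom_parent_role_for parent_id people → Spec_parent_role_for parent_id people (parent_role_for parent_id people)

-- ===== LEMMAS AND PROOFS =====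

-- the accumulator state determined by the two flags "seen father-of" / "seen mother-of"
def encRole (f m : Bool) : Option String :=
  if f && m then some "Parent" else if f then some "Father" else if m then some "Mother" else none

theorem roleStep_enc (f m : Bool) (c : List (String × String)) :
    roleStep (encRole f m) c
      = encRole (f || (assocGet? c "predicate" == some "father-of"))
                (m || (assocGet? c "predicate" == some "mother-of")) := by
  unfold roleStep
  cases hp : assocGet? c "predicate" with
  | none => cases f <;> cases m <;> simp [encRole]
  | some s =>
    by_cases hf : s = "father-of"
    · subst hf; cases f <;> cases m <;> simp [encRole, roleOfPredicate, assocGet?]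
    · by_cases hm : s = "mother-of"
      · subst hm; cases f <;> cases m <;> simp [encRole, roleOfPredicate, assocGet?]
      · cases f <;> cases m <;> simp [encRole, roleOfPredicate, assocGet?, Ne.symm hf, Ne.symm hm, hf, hm]

theorem foldl_roleStep_enc (cs : List (List (String × String))) (f m : Bool) :
    cs.foldl roleStep (encRole f m)
      = encRole (f || cs.any (fun c => assocGet? c "predicate" == some "father-of"))
                (m || cs.any (fun c => assocGet? c "predicate" == some "mother-of")) := by
  induction cs generalizing f m with
  | nil => simp
  | cons c cs ih =>
    simp only [List.foldl_cons, List.any_cons, roleStep_enc, ih, Bool.or_assoc]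

-- ===== VERDICT (by name: the statement is the Claim_ definition above) =====
theorem parent_role_for_spec : Claim_equal_parent_role_for := by
  intro parent_id people _
  unfold Spec_parent_role_for parent_role_for parent_role_for_alt
  cases assocGet? people parent_id with
  | none => rfl
  | some p =>
    by_cases hp : p = []
    · simp [hp]
    · simp only [if_neg hp]
      have h := foldl_roleStep_enc (assocGetD p "claims" []) false false
      simp only [Bool.false_or] at h
      rw [show (none : Option String) = encRole false false from rfl, h]
      cases hF : (assocGetD p "claims" []).any (fun c => assocGet? c "predicate" == some "father-of") <;>
      cases hM : (assocGetD p "claims" []).any (fun c => assocGet? c "predicate" == some "mother-of") <;>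
        simp [encRole]
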